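-- pv_equiv track=rewrite | github.com/Alexeycreator/OsnovyProgramm | SecondSemestr/Практика учебная/Задание 16 (часть 12).py | find_local_max_distance
-- ===== SOURCE A (Python) =====
-- def find_local_max_distance(sequence):
--     max_distance = -1
--     max_index = -1
--     for i in range(1, len(sequence) - 1):
--         if sequence[i] > sequence[i - 1] and sequence[i] > sequence[i + 1]:
--             if max_index != -1:
--                 distance = i - max_index
--                 if max_distance == -1 or distance < max_distance:
--                     max_distance = distance
--             max_index = i
--
--     return max_distance
-- ===== SOURCE B (Python) =====
-- def find_local_max_distance(sequence):
--     idxs = [i for i in range(1, len(sequence) - 1)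
--             if sequence[i] > sequence[i - 1] and sequence[i] > sequence[i + 1]]
--     return min((idxs[j + 1] - idxs[j] for j in range(len(idxs) - 1)), default=-1)
-- ===== Notes on version B (the rewrite author's own statement) =====
-- stated objective: simpler
-- what changed: Replaces the interleaved scan with mutable last-index/min-distance state by two separate passes: a comprehension collecting local-maximum indices, then min over consecutive index differences with default=-1.
import Mathlib
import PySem

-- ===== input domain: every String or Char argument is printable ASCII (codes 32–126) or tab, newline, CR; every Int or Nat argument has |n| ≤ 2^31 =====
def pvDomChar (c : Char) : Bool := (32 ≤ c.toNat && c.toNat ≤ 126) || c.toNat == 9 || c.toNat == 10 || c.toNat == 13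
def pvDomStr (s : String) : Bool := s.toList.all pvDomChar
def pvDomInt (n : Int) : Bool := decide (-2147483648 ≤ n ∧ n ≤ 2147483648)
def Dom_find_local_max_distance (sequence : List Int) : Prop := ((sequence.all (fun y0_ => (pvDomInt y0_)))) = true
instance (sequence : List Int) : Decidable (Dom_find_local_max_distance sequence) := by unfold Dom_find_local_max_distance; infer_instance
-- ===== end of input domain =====

-- B separates the work into two passes (collect local-max indices, then min of consecutive gaps
-- with a -1 default) instead of A's single scan with interleaved last-index/min state: simpler.

-- ===== PORT A =====
def find_local_max_distance (sequence : List Int) : Int :=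
  ((PySem.List.pyRange 1 ((sequence.length : Int) - 1) 1).foldl
    (fun (st : Int × Int) i =>
      if PySem.List.pyGetD sequence i 0 > PySem.List.pyGetD sequence (i - 1) 0 ∧
         PySem.List.pyGetD sequence i 0 > PySem.List.pyGetD sequence (i + 1) 0 then
        if st.2 ≠ -1 then
          ((if st.1 = -1 ∨ i - st.2 < st.1 then i - st.2 else st.1), i)
        else (st.1, i)
      else st)
    (-1, -1)).1

-- ===== PORT B =====
def find_local_max_distance_alt (sequence : List Int) : Int :=
  let idxs := (PySem.List.pyRange 1 ((sequence.length : Int) - 1) 1).filter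
    (fun i => decide (PySem.List.pyGetD sequence i 0 > PySem.List.pyGetD sequence (i - 1) 0) &&
              decide (PySem.List.pyGetD sequence i 0 > PySem.List.pyGetD sequence (i + 1) 0))
  let gaps := (PySem.List.pyRange 0 ((idxs.length : Int) - 1) 1).map
    (fun j => PySem.List.pyGetD idxs (j + 1) 0 - PySem.List.pyGetD idxs j 0)
  match gaps with
  | [] => -1
  | g :: gs => gs.foldl min g

-- ===== PRECONDITION & SPEC =====
def Spec_find_local_max_distance (sequence : List Int) (out : Int) : Prop := out = find_local_max_distance_alt sequence
instance (sequence : List Int) (out : Int) : Decidable (Spec_find_local_max_distance sequence out) := by unfold Spec_find_local_max_distance; infer_instance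

-- ===== CLAIM (what is proved, stated in full; the proofs are below) =====
def Claim_equal_find_local_max_distance : Prop := ∀ (sequence : List Int), Dom_find_local_max_distance sequence → Spec_find_local_max_distance sequence (find_local_max_distance sequence)

-- ===== LEMMAS AND PROOFS =====

-- proof-only helpers
def pvStep (st : Int × Int) (i : Int) : Int × Int :=
  if st.2 ≠ -1 then ((if st.1 = -1 ∨ i - st.2 < st.1 then i - st.2 else st.1), i)
  else (st.1, i)

def pvMg (md p : Int) : List Int → Int
  | [] => md
  | i :: rest => pvMg (if md = -1 ∨ i - p < md then i - p else md) i rest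

lemma pv_foldl_ite_filter {α : Type} (p : Int → Bool) (f : α → Int → α) :
    ∀ (l : List Int) (s : α),
      l.foldl (fun s i => if p i then f s i else s) s = (l.filter p).foldl f s := by
  intro l
  induction l with
  | nil => intro s; rfl
  | cons a l ih =>
    intro s
    by_cases h : p a
    · simp [h, ih]
    · simp [h, ih]

lemma pv_foldl_step_mg :
    ∀ (l : List Int) (md p : Int), 0 ≤ p → (∀ x ∈ l, 0 ≤ x) →
      (l.foldl pvStep (md, p)).1 = pvMg md p l := by
  intro l
  induction l with
  | nil => intro md p _ _; rfl
  | cons i rest ih =>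
    intro md p hp hl
    have hstep : pvStep (md, p) i
        = ((if md = -1 ∨ i - p < md then i - p else md), i) := by
      simp [pvStep, show p ≠ -1 by omega]
    simp only [List.foldl_cons, hstep, pvMg]
    exact ih _ i (hl i (by simp)) (fun x hx => hl x (by simp [hx]))

lemma pv_mg_foldl_min :
    ∀ (rest : List Int) (i g : Int), 0 < g → List.Pairwise (· < ·) (i :: rest) →
      pvMg g i rest = (List.zipWith (fun b a => b - a) rest (i :: rest)).foldl min g := by
  intro rest
  induction rest with
  | nil => intro i g _ _; rfl
  | cons j rest ih =>
    intro i g hg hpair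
    have hij : i < j := (List.pairwise_cons.mp hpair).1 j (by simp)
    have htail : List.Pairwise (· < ·) (j :: rest) := (List.pairwise_cons.mp hpair).2
    have h1 : (if g = -1 ∨ j - i < g then j - i else g) = min g (j - i) := by
      simp only [min_def]; split_ifs <;> omega
    simp only [pvMg, List.zipWith, List.foldl_cons, h1]
    exact ih j (min g (j - i)) (by omega) htail

-- B's gaps list is the consecutive-difference zipWith of idxs
lemma pv_gaps_eq_zipWith (xs : List Int) :
    (PySem.List.pyRange 0 ((xs.length : Int) - 1) 1).map
      (fun j => PySem.List.pyGetD xs (j + 1) 0 - PySem.List.pyGetD xs j 0)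
    = List.zipWith (fun b a => b - a) xs.tail xs := by
  apply List.ext_getElem
  · simp only [List.length_map, PySem.List.length_pyRange_one, List.length_zipWith,
      List.length_tail]
    omega
  · intro k h1 h2
    have hk : k < xs.length - 1 := by
      simpa [PySem.List.length_pyRange_one] using h1
    have hk1 : k + 1 < xs.length := by omega
    simp only [List.getElem_map, PySem.List.getElem_pyRange_one]
    have e1 : (0 : Int) + (k : Int) + 1 = ((k + 1 : Nat) : Int) := by push_cast; ring
    have e2 : (0 : Int) + (k : Int) = ((k : Nat) : Int) := by ring
    rw [e1, e2, PySem.List.pyGetD_natCast, PySem.List.pyGetD_natCast,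
        List.getElem_zipWith, List.getD_eq_getElem _ _ hk1,
        List.getD_eq_getElem _ _ (by omega)]
    simp [List.getElem_tail]

-- B's whole body, on the list of local-max indices, equals A's fold
lemma pv_alt_mg (idxs : List Int) (h0 : ∀ x ∈ idxs, 1 ≤ x)
    (hp : idxs.Pairwise (· < ·)) :
    (idxs.foldl pvStep ((-1 : Int), (-1 : Int))).1 =
    (match (PySem.List.pyRange 0 ((idxs.length : Int) - 1) 1).map
        (fun j => PySem.List.pyGetD idxs (j + 1) 0 - PySem.List.pyGetD idxs j 0) with
     | [] => (-1 : Int)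
     | g :: gs => gs.foldl min g) := by
  rw [pv_gaps_eq_zipWith]
  match idxs, h0, hp with
  | [], _, _ => rfl
  | [p], _, _ =>
    simp [pvStep]
  | p :: i :: rest, h0, hp =>
    have hpi : p < i := (List.pairwise_cons.mp hp).1 i (by simp)
    have htail : List.Pairwise (· < ·) (i :: rest) := (List.pairwise_cons.mp hp).2
    have hfold : (List.foldl pvStep ((-1 : Int), (-1 : Int)) (p :: i :: rest)).1
        = pvMg (-1) p (i :: rest) := by
      rw [List.foldl_cons, show pvStep ((-1 : Int), (-1 : Int)) p = (-1, p) by simp [pvStep]]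
      exact pv_foldl_step_mg (i :: rest) (-1) p
        (by have := h0 p (by simp); omega)
        (fun x hx => by have := h0 x (List.mem_cons_of_mem _ hx); omega)
    rw [hfold]
    have hstep1 : pvMg (-1) p (i :: rest) = pvMg (i - p) i rest := by simp [pvMg]
    rw [hstep1, pv_mg_foldl_min rest i (i - p) (by omega) htail]
    rfl

-- ===== VERDICT (by name: the statement is the Claim_ definition above) =====
theorem find_local_max_distance_spec : Claim_equal_find_local_max_distance := by
  intro sequence _
  unfold Spec_find_local_max_distance find_local_max_distance find_local_max_distance_alt
  have hA : (PySem.List.pyRange 1 ((sequence.length : Int) - 1) 1).foldl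
      (fun (st : Int × Int) i =>
        if PySem.List.pyGetD sequence i 0 > PySem.List.pyGetD sequence (i - 1) 0 ∧
           PySem.List.pyGetD sequence i 0 > PySem.List.pyGetD sequence (i + 1) 0 then
          if st.2 ≠ -1 then
            ((if st.1 = -1 ∨ i - st.2 < st.1 then i - st.2 else st.1), i)
          else (st.1, i)
        else st)
      (-1, -1)
      = (PySem.List.pyRange 1 ((sequence.length : Int) - 1) 1).foldl
        (fun (st : Int × Int) i =>
          if (decide (PySem.List.pyGetD sequence i 0 > PySem.List.pyGetD sequence (i - 1) 0) &&
              decide (PySem.List.pyGetD sequence i 0 > PySem.List.pyGetD sequence (i + 1) 0)) then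
            pvStep st i else st)
        (-1, -1) := by
    congr 1
    funext st i
    by_cases h1 : PySem.List.pyGetD sequence i 0 > PySem.List.pyGetD sequence (i - 1) 0 <;>
      by_cases h2 : PySem.List.pyGetD sequence i 0 > PySem.List.pyGetD sequence (i + 1) 0 <;>
      simp [pvStep, h1, h2]
  rw [hA, pv_foldl_ite_filter]
  exact pv_alt_mg _
    (fun x hx => ((PySem.List.mem_pyRange_one).mp (List.mem_filter.mp hx).1).1)
    ((PySem.List.pairwise_lt_pyRange_one 1 ((sequence.length : Int) - 1)).filter _)
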